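-- pv_equiv track=rewrite | github.com/Brawlback-Team/brawlback-asm | tools/heapDiffGenerator/diff_generator.py | get_concise_heap_region_changes
-- ===== SOURCE A (Python) =====
-- def get_concise_heap_region_changes(heap_output):
--     # key is name of heap region, value is an array of regions that changed
--     heaps = {}
--
--     for heap_info in heap_output:
--         addr = int(heap_info[0], 16)
--         heap_name = heap_info[1]
--         if heap_name not in heaps:
--             heaps[heap_name] = []
--             heaps[heap_name].append([addr, addr, heap_info[1]])
--         else:
--             latest_heap_region = heaps[heap_name][-1]
--             # we need to expand the mem region
--             if latest_heap_region[1] == addr-16 and heap_name == latest_heap_region[2]: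
--                 latest_heap_region[1] = addr
--             # if it's an entirely new heap region
--             elif latest_heap_region[0] > addr or latest_heap_region[1] < addr:
--                 heaps[heap_name].append([addr, addr, heap_info[1]])
--
--     return heaps
-- ===== SOURCE B (Python) =====
-- def get_concise_heap_region_changes(heap_output):
--     # two-pass version: group addresses by heap name first, then merge each
--     # group's addresses into regions
--     groups = {}
--     for hex_addr, heap_name in heap_output:
--         groups.setdefault(heap_name, []).append(int(hex_addr, 16))
--     return {name: _merged_regions(addrs, name) for name, addrs in groups.items()}
--
--
-- def _merged_regions(addrs, name):
--     regions = []
--     for addr in addrs: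
--         if not regions:
--             regions.append([addr, addr, name])
--             continue
--         last = regions[-1]
--         if last[1] == addr - 16:
--             last[1] = addr
--         elif last[0] > addr or last[1] < addr:
--             regions.append([addr, addr, name])
--     return regions
-- ===== Notes on version B (the rewrite author's own statement) =====
-- stated objective: alternative
-- what changed: B replaces A's single interleaved loop that mutates region lists inside one dict with a two-pass decomposition: a grouping pass building name -> list of parsed addresses in first-appearance order, then an independent per-group merge of each address list into regions.
import Mathlib
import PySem

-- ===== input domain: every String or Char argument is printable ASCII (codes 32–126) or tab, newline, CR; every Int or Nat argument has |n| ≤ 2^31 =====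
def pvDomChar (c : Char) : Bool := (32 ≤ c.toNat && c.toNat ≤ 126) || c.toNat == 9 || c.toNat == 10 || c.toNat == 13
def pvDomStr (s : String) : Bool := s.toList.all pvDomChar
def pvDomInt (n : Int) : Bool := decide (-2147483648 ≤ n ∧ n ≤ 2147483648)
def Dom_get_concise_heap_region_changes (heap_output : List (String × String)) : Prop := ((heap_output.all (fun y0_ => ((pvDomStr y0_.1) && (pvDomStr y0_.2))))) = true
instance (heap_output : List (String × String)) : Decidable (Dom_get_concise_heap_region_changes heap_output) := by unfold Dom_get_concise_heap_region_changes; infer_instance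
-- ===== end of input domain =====

-- B is a two-pass decomposition (group addresses by name, then merge each group);
-- equivalence is about the RETURN value (A mutates only its own local dict/lists).

-- int(heap_info[0], 16); Pre_ guarantees the parse succeeds, so the getD 0 default is never used on admitted inputs
def pvParse16 (s : String) : Int := (PySem.Int.ofStrBase? s 16).getD 0

-- ===== PORT A =====
-- the body of A's for-loop (list mutations `latest[1] = addr` / `.append` rendered as
-- re-inserting the updated list at the same key; `heaps[heap_name][-1]` on a present key is getLast?,
-- whose none case is unreachable since every stored list is nonempty)
def pvAStep (heaps : PySem.Dict String (List (Int × Int × String))) (heap_info : String × String) : PySem.Dict String (List (Int × Int × String)) :=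
  let addr := pvParse16 heap_info.1
  let heap_name := heap_info.2
  match heaps.get? heap_name with
  | none => heaps.insert heap_name [(addr, addr, heap_info.2)]
  | some regions =>
    match regions.getLast? with
    | none => heaps  -- unreachable (Python would raise IndexError on [-1] of an empty list; lists here are never empty)
    | some latest =>
      if latest.2.1 = addr - 16 ∧ heap_name = latest.2.2 then
        heaps.insert heap_name (regions.dropLast ++ [(latest.1, addr, latest.2.2)])
      else if latest.1 > addr ∨ latest.2.1 < addr then
        heaps.insert heap_name (regions ++ [(addr, addr, heap_info.2)])
      else heaps

def get_concise_heap_region_changes (heap_output : List (String × String)) : List (String × List (Int × Int × String)) :=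
  (heap_output.foldl pvAStep PySem.Dict.empty).items

-- ===== PORT B =====
-- one step of _merged_regions' loop (in-place `last[1] = addr` rendered as dropLast ++ [updated])
def pvMergeStep (name : String) (regions : List (Int × Int × String)) (addr : Int) : List (Int × Int × String) :=
  match regions.getLast? with
  | none => regions ++ [(addr, addr, name)]          -- `if not regions: regions.append(...)`
  | some last =>
    if last.2.1 = addr - 16 then regions.dropLast ++ [(last.1, addr, last.2.2)]
    else if last.1 > addr ∨ last.2.1 < addr then regions ++ [(addr, addr, name)]
    else regions

def pvMerge (addrs : List Int) (name : String) : List (Int × Int × String) :=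
  addrs.foldl (pvMergeStep name) []

def get_concise_heap_region_changes_alt (heap_output : List (String × String)) : List (String × List (Int × Int × String)) :=
  -- grouping pass: groups.setdefault(name, []).append(int(hex_addr, 16))
  let groups := heap_output.foldl (fun g p => g.modify p.2 [] (· ++ [pvParse16 p.1])) PySem.Dict.empty
  -- merge pass
  groups.items.map (fun q => (q.1, pvMerge q.2 q.1))

-- ===== PRECONDITION & SPEC =====
-- Pre_ excludes exactly the inputs where int(s, 16) raises ValueError (both A and B raise there)
def Pre_get_concise_heap_region_changes (heap_output : List (String × String)) : Prop :=
  ∀ p ∈ heap_output, (PySem.Int.ofStrBase? p.1 16).isSome = true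
instance (heap_output : List (String × String)) : Decidable (Pre_get_concise_heap_region_changes heap_output) := by unfold Pre_get_concise_heap_region_changes; infer_instance
def pvWitness_get_concise_heap_region_changes : (List (String × String)) := [("10", "a"), ("20", "a"), ("100", "b")]

def Spec_get_concise_heap_region_changes (heap_output : List (String × String)) (out : List (String × List (Int × Int × String))) : Prop := out = get_concise_heap_region_changes_alt heap_output
instance (heap_output : List (String × String)) (out : List (String × List (Int × Int × String))) : Decidable (Spec_get_concise_heap_region_changes heap_output out) := by unfold Spec_get_concise_heap_region_changes; infer_instance

-- ===== CLAIM (what is proved, stated in full; the proofs are below) =====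
def Claim_equal_get_concise_heap_region_changes : Prop := ∀ (heap_output : List (String × String)), Dom_get_concise_heap_region_changes heap_output → Pre_get_concise_heap_region_changes heap_output → Spec_get_concise_heap_region_changes heap_output (get_concise_heap_region_changes heap_output)

-- ===== LEMMAS AND PROOFS =====

-- value-wise image of the grouping dict under the merge pass
def pvMapPair (q : String × List Int) : String × List (Int × Int × String) := (q.1, pvMerge q.2 q.1)
def pvMapD (g : PySem.Dict String (List Int)) : PySem.Dict String (List (Int × Int × String)) :=
  PySem.Dict.mk (g.items.map pvMapPair)

theorem pvMapD_keys (g : PySem.Dict String (List Int)) : (pvMapD g).keys = g.keys := by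
  simp [pvMapD, PySem.Dict.keys, List.map_map, Function.comp, pvMapPair]

theorem pvMapD_contains (g : PySem.Dict String (List Int)) (k : String) :
    (pvMapD g).contains k = g.contains k := by
  rw [PySem.Dict.contains_eq_decide_mem_keys, PySem.Dict.contains_eq_decide_mem_keys, pvMapD_keys]

theorem pvMapD_get? (g : PySem.Dict String (List Int)) (k : String) :
    (pvMapD g).get? k = (g.get? k).map (fun as => pvMerge as k) := by
  obtain ⟨l⟩ := g
  induction l with
  | nil => rfl
  | cons h t ih =>
    obtain ⟨hk, hv⟩ := h
    show (PySem.Dict.mk ((hk, pvMerge hv hk) :: t.map pvMapPair)).get? k = _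
    rw [PySem.Dict.get?_mk_cons, PySem.Dict.get?_mk_cons]
    by_cases hkk : hk == k
    · simp only [hkk, if_pos]
      have : hk = k := by exact eq_of_beq hkk
      subst this; rfl
    · simp only [hkk]
      exact ih

theorem pvMergeStep_ne_nil (name : String) (r : List (Int × Int × String)) (a : Int)
    (h : r ≠ []) : pvMergeStep name r a ≠ [] := by
  unfold pvMergeStep
  match hr : r.getLast? with
  | none => simp
  | some last => dsimp only; split_ifs <;> simp [h]

theorem pvMerge_aux_ne_nil (t : List Int) (name : String) (r : List (Int × Int × String)) (h : r ≠ []) :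
    t.foldl (pvMergeStep name) r ≠ [] := by
  induction t generalizing r with
  | nil => exact h
  | cons a t ih => exact ih _ (pvMergeStep_ne_nil name r a h)

theorem pvMerge_ne_nil (as : List Int) (name : String) (h : as ≠ []) : pvMerge as name ≠ [] := by
  match as with
  | [] => exact absurd rfl h
  | a :: t =>
    show (a :: t).foldl (pvMergeStep name) [] ≠ []
    rw [List.foldl_cons]
    exact pvMerge_aux_ne_nil t name _ (by simp [pvMergeStep])

theorem pvMerge_third_aux (t : List Int) (name : String) (r : List (Int × Int × String))
    (h : ∀ x ∈ r, x.2.2 = name) : ∀ x ∈ t.foldl (pvMergeStep name) r, x.2.2 = name := by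
  induction t generalizing r with
  | nil => exact h
  | cons a t ih =>
    rw [List.foldl_cons]
    apply ih
    intro x hx
    unfold pvMergeStep at hx
    match hr : r.getLast? with
    | none =>
      rw [hr] at hx
      simp at hx
      rcases hx with hx | hx
      · exact h x hx
      · subst hx; rfl
    | some last =>
      have hlast : last ∈ r := List.mem_of_getLast? hr
      rw [hr] at hx
      dsimp only at hx
      split_ifs at hx with h1 h2
      · simp at hx
        rcases hx with hx | hx
        · exact h x (List.dropLast_subset _ hx)
        · subst hx; exact h last hlast
      · simp at hx
        rcases hx with hx | hx
        · exact h x hx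
        · subst hx; rfl
      · exact h x hx

theorem pvMerge_third (as : List Int) (name : String) :
    ∀ r ∈ pvMerge as name, r.2.2 = name := pvMerge_third_aux as name [] (by simp)

theorem pvMapD_insert (g : PySem.Dict String (List Int)) (k : String) (as : List Int) :
    (pvMapD g).insert k (pvMerge as k) = pvMapD (g.insert k as) := by
  apply PySem.Dict.ext
  by_cases hc : g.contains k = true
  · rw [PySem.Dict.items_insert_of_contains _ _ ((pvMapD_contains g k).trans hc)]
    show _ = (PySem.Dict.mk ((g.insert k as).items.map pvMapPair)).items
    rw [PySem.Dict.items_insert_of_contains _ _ hc]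
    show (g.items.map pvMapPair).map _ = _
    rw [List.map_map, List.map_map]
    apply List.map_congr_left
    intro q _
    by_cases hq : q.1 == k
    · have : q.1 = k := eq_of_beq hq
      simp [Function.comp, pvMapPair, this]
    · simp [Function.comp, pvMapPair, hq]
  · have hc' : g.contains k = false := by simpa using hc
    rw [PySem.Dict.items_insert_of_not_contains _ _ ((pvMapD_contains g k).trans hc')]
    show (g.items.map pvMapPair) ++ _ = (PySem.Dict.mk ((g.insert k as).items.map pvMapPair)).items
    rw [PySem.Dict.items_insert_of_not_contains _ _ hc']
    simp [pvMapPair]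

theorem pv_insert_self_of_get? {ν : Type} (d : PySem.Dict String ν) (k : String) (v : ν)
    (hnd : d.keys.Nodup) (h : d.get? k = some v) : d.insert k v = d := by
  have hc : d.contains k = true := by
    rw [PySem.Dict.contains_eq_isSome_get?, h]; rfl
  apply PySem.Dict.ext
  rw [PySem.Dict.items_insert_of_contains _ _ hc]
  conv_rhs => rw [← List.map_id d.items]
  apply List.map_congr_left
  intro q hq
  by_cases hqk : q.1 == k
  · have hk : q.1 = k := eq_of_beq hqk
    have hv : d.get? q.1 = some q.2 := PySem.Dict.get?_of_mem_items d (by simpa using hq) hnd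
    rw [hk, h] at hv
    rw [if_pos hqk, Option.some_inj.mp hv, ← hk]
    rfl
  · simp [hqk]

theorem pvStep_comm (g : PySem.Dict String (List Int)) (p : String × String)
    (hnd : g.keys.Nodup) (hne : ∀ q ∈ g.items, q.2 ≠ []) :
    pvAStep (pvMapD g) p = pvMapD (g.modify p.2 [] (· ++ [pvParse16 p.1])) := by
  obtain ⟨s, k⟩ := p
  have hmod : g.modify k [] (· ++ [pvParse16 s]) = g.insert k (g.getD k [] ++ [pvParse16 s]) := rfl
  set a := pvParse16 s with ha
  unfold pvAStep
  dsimp only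
  rw [pvMapD_get? g k]
  cases hget : g.get? k with
  | none =>
    have hgd : g.getD k [] = [] := PySem.Dict.getD_of_get?_eq_none g [] hget
    show (pvMapD g).insert k [(a, a, k)] = _
    rw [hmod, hgd]
    have hm : pvMerge ([] ++ [a]) k = [(a, a, k)] := rfl
    rw [← hm, pvMapD_insert]
  | some as =>
    dsimp only [Option.map_some]
    have hasne : as ≠ [] := hne (k, as) (PySem.Dict.mem_items_of_get?_eq_some g hget)
    have hrne := pvMerge_ne_nil as k hasne
    obtain ⟨last, hlast⟩ : ∃ l, (pvMerge as k).getLast? = some l := by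
      cases hL : (pvMerge as k).getLast? with
      | none => exact absurd (List.getLast?_eq_none_iff.mp hL) hrne
      | some l => exact ⟨l, rfl⟩
    rw [hlast]
    dsimp only
    have h3 : last.2.2 = k := pvMerge_third as k last (List.mem_of_getLast? hlast)
    have hgd : g.getD k [] = as := PySem.Dict.getD_of_get?_eq_some g [] hget
    have hR : pvMapD (g.modify k [] (· ++ [a])) = (pvMapD g).insert k (pvMergeStep k (pvMerge as k) a) := by
      rw [hmod, hgd, ← pvMapD_insert]
      congr 1
      show pvMerge (as ++ [a]) k = pvMergeStep k (pvMerge as k) a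
      simp [pvMerge, List.foldl_append]
    rw [hR]
    unfold pvMergeStep
    rw [hlast]
    dsimp only
    by_cases h1 : last.2.1 = a - 16
    · rw [if_pos h1, if_pos ⟨h1, h3.symm⟩]
    · rw [if_neg h1, if_neg (by tauto)]
      by_cases h2 : last.1 > a ∨ last.2.1 < a
      · rw [if_pos h2, if_pos h2]
      · rw [if_neg h2, if_neg h2]
        have hg2 : (pvMapD g).get? k = some (pvMerge as k) := by
          rw [pvMapD_get?, hget]; rfl
        exact (pv_insert_self_of_get? _ k _ ((pvMapD_keys g).symm ▸ hnd) hg2).symm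

theorem pvMain (l : List (String × String)) (g : PySem.Dict String (List Int))
    (hnd : g.keys.Nodup) (hne : ∀ q ∈ g.items, q.2 ≠ []) :
    l.foldl pvAStep (pvMapD g) =
      pvMapD (l.foldl (fun g p => g.modify p.2 [] (· ++ [pvParse16 p.1])) g) := by
  induction l generalizing g with
  | nil => rfl
  | cons p t ih =>
    rw [List.foldl_cons, List.foldl_cons, pvStep_comm g p hnd hne]
    have hmod : g.modify p.2 [] (· ++ [pvParse16 p.1]) = g.insert p.2 (g.getD p.2 [] ++ [pvParse16 p.1]) := rfl
    apply ih
    · rw [hmod]; exact PySem.Dict.nodup_keys_insert _ _ _ hnd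
    · intro q hq
      rw [hmod] at hq
      rcases (PySem.Dict.mem_items_insert _ _ _ q).mp hq with hq | ⟨hq, _⟩
      · subst hq; simp
      · exact hne q hq

-- ===== VERDICT (by name: the statement is the Claim_ definition above) =====
theorem get_concise_heap_region_changes_spec : Claim_equal_get_concise_heap_region_changes := by
  intro l _ _
  unfold Spec_get_concise_heap_region_changes get_concise_heap_region_changes get_concise_heap_region_changes_alt
  have h := pvMain l PySem.Dict.empty (by simp [PySem.Dict.keys, PySem.Dict.empty]) (by simp [PySem.Dict.empty])
  have he : pvMapD PySem.Dict.empty = PySem.Dict.empty := rfl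
  rw [he] at h
  rw [h]
  rfl
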